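-- pv_equiv track=rewrite | github.com/j-carlos-perez/covering-arrays | analysis/exhaustive_seed_scan.py | coverage_for_method_t
-- ===== SOURCE A (Python) =====
-- import itertools
--
-- def all_t_column_combinations(k, t):
--     return list(itertools.combinations(range(k), t))
--
-- def encode_tuple(values, v):
--     code = 0
--     for x in values:
--         code = code * v + x
--     return code
--
-- def coverage_for_method_t(seed, k, v, t, n_rows, method):
--     combos = all_t_column_combinations(k, t)
--     combo_seen = [set() for _ in combos]
--
--     for r in range(n_rows):
--         for idx, combo in enumerate(combos):
--             vals = []
--             for c in combo:
--                 x = seed[(c - r) % k]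
--                 if method == "full":
--                     x = (x + r) % v
--                 vals.append(x)
--             combo_seen[idx].add(encode_tuple(vals, v))
--
--     combo_counts = [len(s) for s in combo_seen]
--     covered = sum(combo_counts)
--     return covered, combo_counts
-- ===== SOURCE B (Python) =====
-- import itertools
--
-- def _distinct_codes(seed, k, v, rows, method, combo):
--     seen = set()
--     for r in range(rows):
--         code = 0
--         for c in combo:
--             x = seed[(c - r) % k]
--             if method == "full":
--                 x = (x + r) % v
--             code = code * v + x
--         seen.add(code)
--     return len(seen)
--
-- def coverage_for_method_t(seed, k, v, t, n_rows, method):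
--     combos = list(itertools.combinations(range(k), t))
--     # Rows are periodic: the seed index repeats every k rows, and for "full"
--     # the +r shift repeats every |v| rows, so k*|v| is a common period.
--     if t == 0:
--         period = 1
--     elif method == "full":
--         period = k * abs(v)
--     else:
--         period = k
--     rows = min(n_rows, period)
--     counts = [_distinct_codes(seed, k, v, rows, method, combo) for combo in combos]
--     return sum(counts), counts
-- ===== Notes on version B (the rewrite author's own statement) =====
-- stated objective: faster
-- what changed: B exploits that the generated rows are periodic in r (period k for the shift construction, k*|v| for 'full', 1 for t=0) and scans only min(n_rows, period) rows, iterating combo-by-combo instead of A's row-major scan over a parallel list of sets; intended as faster (asymptotic in n_rows), a timing run measured ~2x at its largest size.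
import Mathlib
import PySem

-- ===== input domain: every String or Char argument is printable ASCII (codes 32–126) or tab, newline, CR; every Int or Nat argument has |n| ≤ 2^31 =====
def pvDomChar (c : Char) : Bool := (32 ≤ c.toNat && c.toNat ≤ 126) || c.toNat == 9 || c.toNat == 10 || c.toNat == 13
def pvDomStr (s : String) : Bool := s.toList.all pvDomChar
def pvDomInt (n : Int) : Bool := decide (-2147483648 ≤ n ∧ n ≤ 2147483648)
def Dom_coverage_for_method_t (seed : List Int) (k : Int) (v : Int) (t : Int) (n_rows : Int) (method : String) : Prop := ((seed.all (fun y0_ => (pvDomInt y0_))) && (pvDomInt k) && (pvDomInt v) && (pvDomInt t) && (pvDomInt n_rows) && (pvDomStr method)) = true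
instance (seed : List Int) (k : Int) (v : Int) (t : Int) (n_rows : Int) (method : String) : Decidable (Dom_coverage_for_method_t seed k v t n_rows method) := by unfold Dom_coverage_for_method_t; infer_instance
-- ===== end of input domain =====

-- B changes the algorithm: rows generated by the cyclic construction are periodic in r
-- (period k for the shift construction, k*|v| for "full", 1 for t = 0), so B scans only
-- min(n_rows, period) rows, combo by combo, instead of A's scan of all n_rows rows.

-- ===== PORT A =====
-- itertools.combinations(range(k), t); both Pythons call it (t < 0 raises ValueError, excluded by Pre_)
def pvCombos (k : Int) (t : Int) : List (List Int) :=
  if t < 0 then []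
  else if (PySem.List.pyRange 0 k 1).length < t.toNat then []  -- CPython's 'if r > len(pool): return' short-circuit
  else PySem.List.combinations (PySem.List.pyRange 0 k 1) t.toNat

def encode_tuple (values : List Int) (v : Int) : Int :=
  values.foldl (fun code x => code * v + x) 0

def coverage_for_method_t (seed : List Int) (k : Int) (v : Int) (t : Int) (n_rows : Int) (method : String) : Int × List Int :=
  let combos := pvCombos k t
  let combo_seen : List (PySem.Set Int) := combos.map (fun _ => PySem.Set.empty)
  let combo_seen := (PySem.List.pyRange 0 n_rows 1).foldl (fun cs r =>
    (PySem.List.enumerate combos 0).foldl (fun cs ic =>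
      let vals := ic.2.foldl (fun vals c =>
        let x := PySem.List.pyGetD seed (PySem.Int.mod (c - r) k) 0
        let x := if method = "full" then PySem.Int.mod (x + r) v else x
        vals ++ [x]) []
      PySem.List.pySetD cs ic.1 (PySem.Set.add (PySem.List.pyGetD cs ic.1 PySem.Set.empty) (encode_tuple vals v))) cs) combo_seen
  let combo_counts := combo_seen.map (fun s => (PySem.Set.len s : Int))
  (combo_counts.sum, combo_counts)

-- ===== PORT B =====
def pvDistinctCodes (seed : List Int) (k : Int) (v : Int) (rows : Int) (method : String) (combo : List Int) : Int :=
  let seen := (PySem.List.pyRange 0 rows 1).foldl (fun seen r =>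
    PySem.Set.add seen (combo.foldl (fun code c =>
      let x := PySem.List.pyGetD seed (PySem.Int.mod (c - r) k) 0
      let x := if method = "full" then PySem.Int.mod (x + r) v else x
      code * v + x) 0)) PySem.Set.empty
  (PySem.Set.len seen : Int)

def coverage_for_method_t_alt (seed : List Int) (k : Int) (v : Int) (t : Int) (n_rows : Int) (method : String) : Int × List Int :=
  let combos := pvCombos k t
  let period := if t = 0 then 1 else if method = "full" then k * |v| else k
  let rows := min n_rows period
  let counts := combos.map (fun combo => pvDistinctCodes seed k v rows method combo)
  (counts.sum, counts)

-- ===== PRECONDITION & SPEC =====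
-- Pre_ excludes exactly the inputs where A raises: t < 0 (ValueError in combinations), and —
-- when some t-column combo is actually scanned (0 < t ≤ k, n_rows > 0) — len(seed) < k
-- (IndexError on seed[(c-r)%k]) or method == "full" with v == 0 (ZeroDivisionError on %v).
def Pre_coverage_for_method_t (seed : List Int) (k : Int) (v : Int) (t : Int) (n_rows : Int) (method : String) : Prop :=
  0 ≤ t ∧ (0 < t ∧ t ≤ k ∧ 0 < n_rows → k ≤ (seed.length : Int) ∧ (method = "full" → v ≠ 0))
instance (seed : List Int) (k : Int) (v : Int) (t : Int) (n_rows : Int) (method : String) : Decidable (Pre_coverage_for_method_t seed k v t n_rows method) := by unfold Pre_coverage_for_method_t; infer_instance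

def pvWitness_coverage_for_method_t : List Int × Int × Int × Int × Int × String := ([0, 1, 1], 3, 2, 2, 5, "full")

def Spec_coverage_for_method_t (seed : List Int) (k : Int) (v : Int) (t : Int) (n_rows : Int) (method : String) (out : Int × List Int) : Prop := out = coverage_for_method_t_alt seed k v t n_rows method
instance (seed : List Int) (k : Int) (v : Int) (t : Int) (n_rows : Int) (method : String) (out : Int × List Int) : Decidable (Spec_coverage_for_method_t seed k v t n_rows method out) := by unfold Spec_coverage_for_method_t; infer_instance

-- ===== CLAIM (what is proved, stated in full; the proofs are below) =====
def Claim_equal_coverage_for_method_t : Prop := ∀ (seed : List Int) (k : Int) (v : Int) (t : Int) (n_rows : Int) (method : String), Dom_coverage_for_method_t seed k v t n_rows method → Pre_coverage_for_method_t seed k v t n_rows method → Spec_coverage_for_method_t seed k v t n_rows method (coverage_for_method_t seed k v t n_rows method)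

-- ===== LEMMAS AND PROOFS =====

-- the per-cell value both programs compute for column c in row r
def pvVal (seed : List Int) (k : Int) (v : Int) (method : String) (r : Int) (c : Int) : Int :=
  let x := PySem.List.pyGetD seed (PySem.Int.mod (c - r) k) 0
  if method = "full" then PySem.Int.mod (x + r) v else x

lemma mem_pvCombos (k t : Int) (combo : List Int) :
    combo ∈ pvCombos k t ↔ 0 ≤ t ∧ combo ∈ PySem.List.combinations (PySem.List.pyRange 0 k 1) t.toNat := by
  unfold pvCombos
  split_ifs with h1 h2
  · simp; omega
  · rw [PySem.List.combinations_eq_nil_of_length_lt _ h2]; simp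
  · simp; omega

-- A's "build vals, then encode" equals B's direct Horner fold
lemma encode_eq (combo : List Int) (v : Int) (h : Int → Int) :
    encode_tuple (combo.foldl (fun vals c => vals ++ [h c]) []) v
      = combo.foldl (fun code c => code * v + h c) 0 := by
  rw [PySem.List.foldl_append_singleton_eq_map, List.nil_append]
  unfold encode_tuple
  rw [List.foldl_map]

-- one row of A's enumerate/set-update loop, over any prefix already processed
lemma inner_row (f : List Int → Int) : ∀ (combos : List (List Int)) (pre : List (PySem.Set Int)) (g : List Int → PySem.Set Int),
    (PySem.List.enumerate combos (pre.length : Int)).foldl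
        (fun cs ic => PySem.List.pySetD cs ic.1 (PySem.Set.add (PySem.List.pyGetD cs ic.1 PySem.Set.empty) (f ic.2)))
        (pre ++ combos.map g)
      = pre ++ combos.map (fun c => PySem.Set.add (g c) (f c)) := by
  intro combos
  induction combos with
  | nil => intro pre g; simp [PySem.List.enumerate_nil]
  | cons c cs ih =>
    intro pre g
    rw [PySem.List.enumerate_cons]
    simp only [List.foldl_cons, List.map_cons]
    have hget : PySem.List.pyGetD (pre ++ g c :: cs.map g) (pre.length : Int) PySem.Set.empty = g c := by
      rw [PySem.List.pyGetD_natCast]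
      simp [List.getD]
    have hset : PySem.List.pySetD (pre ++ g c :: cs.map g) (pre.length : Int) (PySem.Set.add (g c) (f c))
        = (pre ++ [PySem.Set.add (g c) (f c)]) ++ cs.map g := by
      rw [PySem.List.pySetD_natCast]
      simp
    rw [hget, hset]
    have hlen : ((pre.length : Int) + 1) = (((pre ++ [PySem.Set.add (g c) (f c)]).length : Nat) : Int) := by
      simp
    rw [hlen, ih (pre ++ [PySem.Set.add (g c) (f c)]) g]
    simp

-- A's whole row-major double loop equals the combo-major fold
lemma interchange (f : List Int → Int → Int) :
    ∀ (rows : List Int) (combos : List (List Int)) (g : List Int → PySem.Set Int),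
    rows.foldl (fun cs r =>
        (PySem.List.enumerate combos 0).foldl
          (fun cs ic => PySem.List.pySetD cs ic.1 (PySem.Set.add (PySem.List.pyGetD cs ic.1 PySem.Set.empty) (f ic.2 r))) cs)
        (combos.map g)
      = combos.map (fun c => rows.foldl (fun s r => PySem.Set.add s (f c r)) (g c)) := by
  intro rows
  induction rows with
  | nil => intro combos g; simp
  | cons r rs ih =>
    intro combos g
    simp only [List.foldl_cons]
    have hrow := inner_row (fun c => f c r) combos [] g
    simp only [List.nil_append, List.length_nil, Nat.cast_zero] at hrow
    rw [hrow, ih combos (fun c => PySem.Set.add (g c) (f c r))]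

-- Python mod is periodic: congruent arguments give equal remainders (any nonzero divisor)
lemma pymod_congr (a b w : Int) (hw : w ≠ 0) (h : w ∣ a - b) :
    PySem.Int.mod a w = PySem.Int.mod b w := by
  have ha := PySem.Int.floordiv_mul_add_mod a w
  have hb := PySem.Int.floordiv_mul_add_mod b w
  obtain ⟨m, hm⟩ := h
  have hkey : PySem.Int.mod a w - PySem.Int.mod b w
      = w * (m - PySem.Int.floordiv a w + PySem.Int.floordiv b w) := by ring_nf; nlinarith [ha, hb, hm]
  have hdvd : w ∣ PySem.Int.mod a w - PySem.Int.mod b w := ⟨_, hkey⟩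
  have hz : PySem.Int.mod a w - PySem.Int.mod b w = 0 := by
    rcases lt_or_gt_of_ne hw with hneg | hpos
    · have b1 := PySem.Int.mod_neg_bounds a hneg
      have b2 := PySem.Int.mod_neg_bounds b hneg
      refine Int.eq_zero_of_dvd_of_natAbs_lt_natAbs hdvd ?_
      omega
    · have b1 := PySem.Int.mod_nonneg a hpos
      have b2 := PySem.Int.mod_nonneg b hpos
      have b3 := PySem.Int.mod_lt a hpos
      have b4 := PySem.Int.mod_lt b hpos
      refine Int.eq_zero_of_dvd_of_natAbs_lt_natAbs hdvd ?_
      omega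
  omega

-- the cell value is periodic in r with any positive common period L of k and (for "full") v
lemma pvVal_periodic (seed : List Int) (k v L : Int) (method : String) (c : Int)
    (hk : 0 < k) (hL : 0 < L) (hdk : k ∣ L) (hv : method = "full" → v ≠ 0 ∧ v ∣ L) (r : Int) :
    pvVal seed k v method r c = pvVal seed k v method (PySem.Int.mod r L) c := by
  have hrL : PySem.Int.mod r L = r % L := PySem.Int.mod_eq_emod_of_pos hL
  have hLd : L ∣ r - PySem.Int.mod r L := by
    rw [hrL]
    exact ⟨r / L, by have := Int.mul_ediv_add_emod r L; linarith⟩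
  have hidx : PySem.Int.mod (c - r) k = PySem.Int.mod (c - PySem.Int.mod r L) k := by
    refine pymod_congr _ _ _ (by omega) ?_
    have h3 : (c - r) - (c - PySem.Int.mod r L) = -(r - PySem.Int.mod r L) := by ring
    rw [h3]
    exact (dvd_trans hdk hLd).neg_right
  unfold pvVal
  rw [hidx]
  by_cases hf : method = "full"
  · simp only [hf]
    refine pymod_congr _ _ _ (hv hf).1 ?_
    simpa [add_sub_add_left_eq_sub] using dvd_trans (hv hf).2 hLd
  · simp only [if_neg hf]

-- distinct values of a periodic function over range(n) = over range(min n L)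
lemma len_ofList_range_eq (e : Int → Int) (n L : Int) (hL : 0 < L)
    (he : ∀ r, 0 ≤ r → e r = e (PySem.Int.mod r L)) :
    (PySem.Set.ofList ((PySem.List.pyRange 0 n 1).map e)).length
      = (PySem.Set.ofList ((PySem.List.pyRange 0 (min n L) 1).map e)).length := by
  refine List.Perm.length_eq ?_
  rw [List.perm_ext_iff_of_nodup (PySem.Set.nodup_ofList _) (PySem.Set.nodup_ofList _)]
  intro x
  simp only [PySem.Set.mem_ofList, List.mem_map, PySem.List.mem_pyRange_one]
  constructor
  · rintro ⟨r, ⟨h0, hn⟩, rfl⟩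
    refine ⟨PySem.Int.mod r L, ⟨PySem.Int.mod_nonneg r hL, ?_⟩, (he r h0).symm⟩
    have b1 := PySem.Int.mod_lt r hL
    have b2 : PySem.Int.mod r L ≤ r := by
      rw [PySem.Int.mod_eq_emod_of_pos hL]
      have h3 : r % L = r - L * (r / L) := by
        have := Int.mul_ediv_add_emod r L; linarith
      have h4 : 0 ≤ r / L := Int.ediv_nonneg h0 (le_of_lt hL)
      nlinarith
    omega
  · rintro ⟨r, ⟨h0, hn⟩, rfl⟩
    exact ⟨r, ⟨h0, by omega⟩, rfl⟩

-- per-combo: A's distinct-code count over all n rows equals B's over min(n, period) rows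
lemma count_eq (seed : List Int) (k v n L : Int) (method : String) (combo : List Int)
    (hL : 0 < L)
    (he : ∀ r, 0 ≤ r →
      combo.foldl (fun code c => code * v + pvVal seed k v method r c) 0
        = combo.foldl (fun code c => code * v + pvVal seed k v method (PySem.Int.mod r L) c) 0) :
    ((PySem.List.pyRange 0 n 1).foldl
        (fun s r => PySem.Set.add s (combo.foldl (fun code c => code * v + pvVal seed k v method r c) 0))
        PySem.Set.empty).length
      = ((PySem.List.pyRange 0 (min n L) 1).foldl
        (fun s r => PySem.Set.add s (combo.foldl (fun code c => code * v + pvVal seed k v method r c) 0))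
        PySem.Set.empty).length := by
  rw [← PySem.Set.update_map_eq_foldl_add, ← PySem.Set.update_map_eq_foldl_add,
      PySem.Set.update_empty, PySem.Set.update_empty]
  exact len_ofList_range_eq _ n L hL he

-- ===== VERDICT (by name: the statement is the Claim_ definition above) =====
theorem coverage_for_method_t_spec : Claim_equal_coverage_for_method_t := by
  intro seed k v t n_rows method hDom hPre
  unfold Spec_coverage_for_method_t coverage_for_method_t coverage_for_method_t_alt pvDistinctCodes
  simp only []
  rw [interchange (fun combo r => encode_tuple (combo.foldl (fun vals c =>
        vals ++ [let x := PySem.List.pyGetD seed (PySem.Int.mod (c - r) k) 0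
                 if method = "full" then PySem.Int.mod (x + r) v else x]) []) v)
      (PySem.List.pyRange 0 n_rows 1) (pvCombos k t) (fun _ => PySem.Set.empty)]
  rw [List.map_map]
  have hlist : ∀ combo ∈ pvCombos k t,
      (((PySem.List.pyRange 0 n_rows 1).foldl (fun s r => PySem.Set.add s (encode_tuple (combo.foldl (fun vals c =>
        vals ++ [let x := PySem.List.pyGetD seed (PySem.Int.mod (c - r) k) 0
                 if method = "full" then PySem.Int.mod (x + r) v else x]) []) v)) PySem.Set.empty).length : Int)
      = (((PySem.List.pyRange 0 (min n_rows (if t = 0 then 1 else if method = "full" then k * |v| else k)) 1).foldl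
          (fun s r => PySem.Set.add s (combo.foldl (fun code c =>
            code * v + (let x := PySem.List.pyGetD seed (PySem.Int.mod (c - r) k) 0
                        if method = "full" then PySem.Int.mod (x + r) v else x)) 0)) PySem.Set.empty).length : Int) := by
    intro combo hmem
    have hA : ∀ (r c : Int),
        (let x := PySem.List.pyGetD seed (PySem.Int.mod (c - r) k) 0
         if method = "full" then PySem.Int.mod (x + r) v else x) = pvVal seed k v method r c :=
      fun _ _ => rfl
    simp only [hA, encode_eq]
    by_cases hn : n_rows ≤ 0
    · rw [PySem.List.pyRange_one_eq_nil (by omega),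
          PySem.List.pyRange_one_eq_nil (le_trans (min_le_left _ _) (by omega))]
    · by_cases ht0 : t = 0
      · have hc : combo = [] := by
          have := ((mem_pvCombos k t combo).mp hmem).2
          simpa [ht0] using this
        subst hc
        rw [if_pos ht0]
        exact_mod_cast count_eq seed k v n_rows 1 method [] (by norm_num) (fun r hr => rfl)
      · have hmem' := (PySem.List.mem_combinations_iff _ _ _).mp ((mem_pvCombos k t combo).mp hmem).2
        have ht : 0 < t := lt_of_le_of_ne hPre.1 (Ne.symm ht0)
        have hlen : combo.length = t.toNat := hmem'.2
        have hkpos : 0 < k := by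
          have h1 : combo ≠ [] := by
            intro h; rw [h] at hlen; simp at hlen; omega
          have h2 := hmem'.1.length_le
          rw [PySem.List.length_pyRange_one] at h2
          have : 0 < combo.length := List.length_pos_of_ne_nil h1
          omega
        have htk : t ≤ k := by
          have h2 := hmem'.1.length_le
          rw [PySem.List.length_pyRange_one] at h2
          omega
        have hpre2 := hPre.2 ⟨ht, htk, by omega⟩
        rw [if_neg ht0]
        by_cases hf : method = "full"
        · have hv0 : v ≠ 0 := hpre2.2 hf
          rw [if_pos hf]
          refine congrArg _ (count_eq seed k v n_rows (k * |v|) method combo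
            (mul_pos hkpos (abs_pos.mpr hv0)) ?_)
          intro r hr
          have hstep : (fun (code : Int) (c : Int) => code * v + pvVal seed k v method r c)
              = (fun code c => code * v + pvVal seed k v method (PySem.Int.mod r (k * |v|)) c) := by
            funext code c
            rw [pvVal_periodic seed k v (k * |v|) method c hkpos
              (mul_pos hkpos (abs_pos.mpr hv0)) (Dvd.intro _ rfl)
              (fun _ => ⟨hv0, Dvd.dvd.mul_left ((dvd_abs v v).mpr dvd_rfl) k⟩) r]
          rw [hstep]
        · rw [if_neg hf]
          refine congrArg _ (count_eq seed k v n_rows k method combo hkpos ?_)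
          intro r hr
          have hstep : (fun (code : Int) (c : Int) => code * v + pvVal seed k v method r c)
              = (fun code c => code * v + pvVal seed k v method (PySem.Int.mod r k) c) := by
            funext code c
            rw [pvVal_periodic seed k v k method c hkpos hkpos dvd_rfl
              (fun h => absurd h hf) r]
          rw [hstep]
  refine congrArg (fun l : List Int => (l.sum, l)) ?_
  refine List.map_congr_left ?_
  intro combo hmem
  simpa [Function.comp, PySem.Set.len] using hlist combo hmem
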